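/-
  jsmn_s.bin: `jsmn_parse` — small facts shared by the regions (the S twin of Prog/Jsmn/D/ParseLemmas.lean, which is imported for
  `ToksArg.frame` (a `v3_frame` rule), `toksBytes_congr`, `u32_i32_nat`):
    FrameCore.image / code / text       the image, the code of jsmn_parse and the text are in memory at every cut point
    scratch, FrameCore.of_kept, Frame.of_kept     a region that writes only scratch registers keeps the frame
    FrameCore.store_parser              … and ONE 4-byte store inside the parser struct changes only `ParserAt`
-/
import Prog.Jsmn.S.ParseInv
import Prog.Jsmn.D.ParseLemmas

namespace X86
namespace J6
namespace S
open X86.User (CodeAt RegsKept Span FlagsOK Layout toNat_add_ofNat toNat_ofNat_lt' add_ofNat_add)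
open Jsmn JsmnSBytes

set_option linter.unusedVariables false
set_option maxRecDepth 100000
set_option maxHeartbeats 4000000

variable {c : PCtx} {n : User.Layout} {v0 v : User.State} {p : Parser} {toks : Option Tokens}

/-- The image is still in memory at every cut point of jsmn_parse (it lies off the stack window, the parser and the token array). -/
theorem FrameCore.image (hf : FrameCore c n v0 v p toks) : CodeAt v.mem 0x100000 image_bytes := by
  have hs := hf.same
  have he := hf.entry
  have hW := hf.entry.pre.toksW
  v3_open he hW
  j6_bin
  unfold dataWins PCtx.tlen at hs
  v3_frame he_pre_call_img

/-- The code of jsmn_parse at every cut point. -/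
theorem FrameCore.code (hf : FrameCore c n v0 v p toks) : CodeAt v.mem 0x1002a9 jsmn_parse_bytes :=
  JsmnS.tjs_jsmn_parse_code hf.image

/-- The text is still in memory at every cut point of jsmn_parse. -/
theorem FrameCore.text (hf : FrameCore c n v0 v p toks) : CodeAt v.mem c.jsA c.js := by
  have hs := hf.same
  have he := hf.entry
  have hW := hf.entry.pre.toksW
  v3_open he hW
  j6_bin
  unfold dataWins PCtx.tlen at hs
  v3_frame he_pre_text

/-- The registers a region of jsmn_parse may change freely: the caller-saved ones and rbx (the current character). r12 (the count) is not among
them: it belongs to `Frame`, not to `FrameCore`. -/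
abbrev scratch : List Reg := [.rax, .rbx, .rcx, .rdx, .rsi, .rdi, .r8, .r9, .r10, .r11]

/-- `FrameCore` in a state with the same memory and the same frame registers. -/
theorem FrameCore.of_kept {v' : User.State} (h : FrameCore c n v0 v p toks) (hm : v'.mem = v.mem) (hk : RegsKept (.r12 :: scratch) v v') :
    FrameCore c n v0 v' p toks := by
  refine ⟨h.entry, ?_, ?_, ?_, ?_, ?_, ?_, ?_, ?_, ?_, ?_, ?_, ?_, ?_, ?_, ?_, ?_, h.null⟩
  · rw [hk .rsp rfl]; exact h.rsp
  · rw [hk .rbp rfl]; exact h.rbp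
  · rw [hk .r15 rfl]; exact h.r15
  · rw [hk .r14 rfl]; exact h.r14
  · rw [hk .r13 rfl]; exact h.r13
  · rw [hm]; exact h.ntok
  · rw [hm]; exact h.sv15
  · rw [hm]; exact h.sv14
  · rw [hm]; exact h.sv13
  · rw [hm]; exact h.sv12
  · rw [hm]; exact h.svbp
  · rw [hm]; exact h.svbx
  · rw [hm]; exact h.retA
  · rw [hm]; exact h.same
  · rw [hm]; exact h.parser
  · rw [hm]; exact h.toksArg

/-- `FrameCore` after ONE 4-byte store inside the parser struct: everything but `ParserAt` is carried over. -/
theorem FrameCore.store_parser {v' : User.State} {p' : Parser} {a : Word} {x : Nat} (h : FrameCore c n v0 v p toks)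
    (hm : v'.mem = v.mem.writeLE a 4 x) (hk : RegsKept (.r12 :: scratch) v v') (ha : c.pa.toNat ≤ a.toNat ∧ a.toNat + 4 ≤ c.pa.toNat + 12)
    (hp : ParserAt v'.mem c.pa p') : FrameCore c n v0 v' p' toks := by
  have hnull := toksBytes_congr Config.strictLinks c.numTokens h.null
  have hta := h.toksArg
  obtain ⟨ha1, ha2⟩ := ha
  have he := h.entry.pre.env
  have hc := h.entry.pre.call
  have h_same := h.same
  have hW := h.entry.pre.toksW
  v3_open he hc hW
  j6_bin
  unfold dataWins PCtx.tlen at h_same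
  rw [← hnull] at hW_hi hW_img hW_stk he_parserToks he_jsToks h_same
  refine ⟨h.entry, ?_, ?_, ?_, ?_, ?_, ?_, ?_, ?_, ?_, ?_, ?_, ?_, ?_, ?_, hp, ?_, h.null⟩
  · rw [hk .rsp rfl]; exact h.rsp
  · rw [hk .rbp rfl]; exact h.rbp
  · rw [hk .r15 rfl]; exact h.r15
  · rw [hk .r14 rfl]; exact h.r14
  · rw [hk .r13 rfl]; exact h.r13
  · rw [hm]; v3_frame h.ntok
  · rw [hm]; v3_frame h.sv15
  · rw [hm]; v3_frame h.sv14
  · rw [hm]; v3_frame h.sv13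
  · rw [hm]; v3_frame h.sv12
  · rw [hm]; v3_frame h.svbp
  · rw [hm]; v3_frame h.svbx
  · rw [hm]; v3_frame h.retA
  · rw [hm]; unfold dataWins PCtx.tlen; rw [← hnull]; v3_same
  · rw [hm]; exact hta.frame (by v3_eqon) (by v3_omega)

/-- `Frame` in a state with the same memory and the same frame registers (r12, the count, among them). -/
theorem Frame.of_kept {s : St} {v' : User.State} (h : Frame c n v0 v s) (hm : v'.mem = v.mem) (hk : RegsKept scratch v v') : Frame c n v0 v' s :=
  ⟨h.core.of_kept hm (hk.mono (by intro r; cases r <;> decide)), by rw [hk .r12 rfl]; exact h.r12, h.cnt, h.inv⟩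

end S
end J6
end X86
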